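-- pv_equiv track=rewrite | github.com/MrBrantCode/unitest_baseline | mut_generate/mist_train_taco/taco_722/solution.py | generate_knight_positions
-- ===== SOURCE A (Python) =====
-- def generate_knight_positions(n: int) -> list:
--     anss = [(0, 0)]
--     for i in range(1, n):
--         anss.append((0, i))
--         anss.append((i, 0))
--         anss.append((0, -i))
--         anss.append((-i, 0))
--
--     # Return only the first n positions to match the initial number of knights
--     return anss[:n]
-- ===== SOURCE B (Python) =====
-- def _pos(k: int):
--     if k == 0:
--         return (0, 0)
--     i = (k - 1) // 4 + 1
--     r = (k - 1) % 4
--     if r == 0: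
--         return (0, i)
--     if r == 1:
--         return (i, 0)
--     if r == 2:
--         return (0, -i)
--     return (-i, 0)
--
--
-- def generate_knight_positions(n: int) -> list:
--     return [_pos(k) for k in range(n)]
-- ===== Notes on version B (the rewrite author's own statement) =====
-- stated objective: simpler
-- what changed: Instead of building the full ring list and slicing it, B computes each output element directly by a closed form on its index (quotient and remainder of the predecessor of the index by four), producing exactly n elements in one pass with no overbuilding and no slice copy.
import Mathlib
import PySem

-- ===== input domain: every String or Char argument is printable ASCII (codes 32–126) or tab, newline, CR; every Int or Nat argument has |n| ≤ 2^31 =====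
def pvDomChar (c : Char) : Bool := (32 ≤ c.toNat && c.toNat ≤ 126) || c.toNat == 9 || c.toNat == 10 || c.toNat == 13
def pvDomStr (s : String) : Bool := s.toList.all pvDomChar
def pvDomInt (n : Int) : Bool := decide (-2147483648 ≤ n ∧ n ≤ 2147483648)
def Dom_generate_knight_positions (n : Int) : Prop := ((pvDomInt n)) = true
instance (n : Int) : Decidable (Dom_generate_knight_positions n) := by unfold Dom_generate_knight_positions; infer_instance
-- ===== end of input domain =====

-- B computes each output element by a closed form on its index instead of building the full ring list and slicing; objective: simpler.

-- ===== PORT A =====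
def generate_knight_positions (n : Int) : List (Int × Int) :=
  let anss : List (Int × Int) :=
    (PySem.List.pyRange 1 n 1).foldl
      (fun anss i => anss ++ [(0, i), (i, 0), (0, -i), (-i, 0)]) [(0, 0)]
  PySem.List.slice anss none (some n)

-- ===== PORT B =====
def gkpPos (k : Int) : Int × Int :=
  if k == 0 then (0, 0)
  else
    let i := PySem.Int.floordiv (k - 1) 4 + 1
    let r := PySem.Int.mod (k - 1) 4
    if r == 0 then (0, i)
    else if r == 1 then (i, 0)
    else if r == 2 then (0, -i)
    else (-i, 0)

def generate_knight_positions_alt (n : Int) : List (Int × Int) :=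
  (PySem.List.pyRange 0 n 1).map gkpPos

-- ===== PRECONDITION & SPEC =====
def Spec_generate_knight_positions (n : Int) (out : List (Int × Int)) : Prop := out = generate_knight_positions_alt n
instance (n : Int) (out : List (Int × Int)) : Decidable (Spec_generate_knight_positions n out) := by unfold Spec_generate_knight_positions; infer_instance

-- ===== CLAIM (what is proved, stated in full; the proofs are below) =====
def Claim_equal_generate_knight_positions : Prop := ∀ (n : Int), Dom_generate_knight_positions n → Spec_generate_knight_positions n (generate_knight_positions n)

-- ===== LEMMAS AND PROOFS =====

-- gkpPos at index 4*m + r + 1 (ring m+1, direction r)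
theorem gkpPos_at (m r : Nat) (hr : r < 4) :
    gkpPos ((4 * m + r + 1 : Nat) : Int) =
      (if r = 0 then (0, (m : Int) + 1) else if r = 1 then ((m : Int) + 1, 0)
       else if r = 2 then (0, -((m : Int) + 1)) else (-((m : Int) + 1), 0)) := by
  simp only [gkpPos, beq_iff_eq]
  rw [show ((4 * m + r + 1 : Nat) : Int) - 1 = ((4 * m + r : Nat) : Int) by push_cast; ring]
  have hq : PySem.Int.floordiv ((4 * m + r : Nat) : Int) 4 = (m : Int) := by
    rw [PySem.Int.floordiv_eq_iff_of_pos (by norm_num : (0:Int) < 4)]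
    constructor <;> push_cast <;> omega
  have hrm : PySem.Int.mod ((4 * m + r : Nat) : Int) 4 = (r : Int) := by
    have h2 := PySem.Int.floordiv_mul_add_mod ((4 * m + r : Nat) : Int) 4
    rw [hq] at h2
    push_cast at h2 ⊢
    omega
  rw [hq, hrm]
  split_ifs <;> first | rfl | (exfalso; omega)

-- A's fully built list equals the closed form over all its 1+4*(n-1) indices
theorem gkp_full (m : Nat) :
    ((PySem.List.pyRange 1 (1 + (m : Int)) 1).foldl
      (fun anss i => anss ++ [(0, i), (i, 0), (0, -i), (-i, 0)]) [((0 : Int), (0 : Int))]) =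
    (List.range (1 + 4 * m)).map (fun k : Nat => gkpPos (k : Int)) := by
  induction m with
  | zero =>
    simp [PySem.List.pyRange_one_eq_nil, gkpPos]
  | succ m ih =>
    have hsplit : PySem.List.pyRange 1 (1 + ((m + 1 : Nat) : Int)) 1
        = PySem.List.pyRange 1 (1 + (m : Int)) 1 ++ [1 + (m : Int)] := by
      have h : (1 + ((m + 1 : Nat) : Int)) = (1 + (m : Int)) + 1 := by push_cast; ring
      rw [h, PySem.List.pyRange_one_succ_right (by omega)]
    rw [hsplit, List.foldl_append, ih]
    have hr : 1 + 4 * (m + 1) = (1 + 4 * m) + 1 + 1 + 1 + 1 := by omega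
    rw [hr]
    have h1 : gkpPos ((1 + 4 * m : Nat) : Int) = (0, (m : Int) + 1) := by
      rw [show 1 + 4 * m = 4 * m + 0 + 1 from by ring]
      simpa using gkpPos_at m 0 (by norm_num)
    have h2 : gkpPos ((1 + 4 * m + 1 : Nat) : Int) = ((m : Int) + 1, 0) := by
      rw [show 1 + 4 * m + 1 = 4 * m + 1 + 1 from by ring]
      simpa using gkpPos_at m 1 (by norm_num)
    have h3 : gkpPos ((1 + 4 * m + 1 + 1 : Nat) : Int) = (0, -((m : Int) + 1)) := by
      rw [show 1 + 4 * m + 1 + 1 = 4 * m + 2 + 1 from by ring]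
      simpa using gkpPos_at m 2 (by norm_num)
    have h4 : gkpPos ((1 + 4 * m + 1 + 1 + 1 : Nat) : Int) = (-((m : Int) + 1), 0) := by
      rw [show 1 + 4 * m + 1 + 1 + 1 = 4 * m + 3 + 1 from by ring]
      simpa using gkpPos_at m 3 (by norm_num)
    simp only [List.range_succ, List.map_append, List.map_cons, List.map_nil, h1, h2, h3, h4,
      List.foldl_cons, List.foldl_nil]
    have hc : (1 + (m : Int)) = ((m : Int) + 1) := by ring
    rw [hc]
    simp [List.append_assoc]

-- taking a prefix of a mapped range is the mapped shorter range
theorem take_map_range {α : Type} (f : Nat → α) (a b : Nat) (h : a ≤ b) :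
    (List.map f (List.range b)).take a = List.map f (List.range a) := by
  rw [← List.map_take, List.take_range, Nat.min_eq_left h]

-- ===== VERDICT (by name: the statement is the Claim_ definition above) =====
theorem generate_knight_positions_spec : Claim_equal_generate_knight_positions := by
  intro n _
  unfold Spec_generate_knight_positions generate_knight_positions generate_knight_positions_alt
  by_cases hn : n ≤ 0
  · have h1 : PySem.List.pyRange 1 n 1 = [] := PySem.List.pyRange_one_eq_nil (by omega)
    have h2 : PySem.List.pyRange 0 n 1 = [] := PySem.List.pyRange_one_eq_nil hn
    simp only [h1, h2, List.foldl_nil, List.map_nil]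
    simp [PySem.List.slice, PySem.List.clampIdx]
    split_ifs <;> simp_all
    omega
  · -- n ≥ 1: write n = 1 + m
    push Not at hn
    obtain ⟨m, hm⟩ : ∃ m : Nat, n = 1 + (m : Int) := ⟨(n - 1).toNat, by omega⟩
    subst hm
    rw [gkp_full m]
    have hb : PySem.List.pyRange 0 (1 + (m : Int)) 1
        = (List.range (1 + m)).map (fun k : Nat => (k : Int)) := by
      rw [PySem.List.pyRange_one]
      have ht : ((1 + (m : Int)) - 0).toNat = 1 + m := by omega
      rw [ht]
      simp only [zero_add]
    rw [hb, List.map_map]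
    have hnn : (1 + (m : Int)) = ((1 + m : Nat) : Int) := by push_cast; ring
    rw [hnn, PySem.List.slice_to_natCast]
    rw [take_map_range _ _ _ (by omega)]
    rfl
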